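-- pv_equiv track=rewrite | github.com/Steven-UY/codepath | unit2/advancedSet1(sets)/1.py | find_balanced_subsequence
-- ===== SOURCE A (Python) =====
-- def find_balanced_subsequence(art_pieces):
--
--     unique_values = set(art_pieces)
--     result = 0
--
--     for val in unique_values:
--         if val + 1 in unique_values:
--             subsequence_length = 0
--             for piece in art_pieces:
--                 if piece == val or piece == val + 1:
--                     subsequence_length += 1
--             result = max(result, subsequence_length)
--
--     return result
-- ===== SOURCE B (Python) =====
-- def find_balanced_subsequence(art_pieces):
--     # Sort once, then sweep consecutive (value, count) groups; whenever a group's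
--     # value is exactly the previous group's value + 1, their sizes combine.
--     result = 0
--     prev = None  # (value, count) of the previous group
--     pieces = sorted(art_pieces)
--     i = 0
--     n = len(pieces)
--     while i < n:
--         v = pieces[i]
--         j = i
--         while j < n and pieces[j] == v:
--             j += 1
--         c = j - i
--         if prev is not None and v == prev[0] + 1:
--             result = max(result, prev[1] + c)
--         prev = (v, c)
--         i = j
--     return result
-- ===== Notes on version B (the rewrite author's own statement) =====
-- stated objective: faster
-- what changed: B sorts a copy once and sweeps it building consecutive (value,count) run groups, combining a group with the previous one whenever the values differ by exactly 1; A instead iterates over the set of values and rescans the whole list for each candidate value.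
import Mathlib
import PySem

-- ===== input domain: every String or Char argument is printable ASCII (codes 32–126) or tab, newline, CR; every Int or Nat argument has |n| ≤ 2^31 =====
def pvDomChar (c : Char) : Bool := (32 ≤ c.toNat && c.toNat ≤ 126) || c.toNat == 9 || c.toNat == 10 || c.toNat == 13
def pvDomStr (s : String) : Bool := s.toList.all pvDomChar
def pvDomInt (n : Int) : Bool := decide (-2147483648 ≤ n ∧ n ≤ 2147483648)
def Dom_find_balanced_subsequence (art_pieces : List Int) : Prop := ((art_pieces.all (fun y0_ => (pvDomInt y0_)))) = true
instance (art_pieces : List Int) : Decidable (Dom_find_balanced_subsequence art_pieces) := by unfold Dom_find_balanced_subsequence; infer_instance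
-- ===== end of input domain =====

-- B sorts a copy once and sweeps consecutive (value, count) run groups, combining
-- adjacent groups whose values differ by exactly 1, instead of A's rescan of the
-- whole list for every unique value (objective: faster).

-- ===== PORT A =====
def find_balanced_subsequence (art_pieces : List Int) : Int :=
  let unique_values : PySem.Set Int := PySem.Set.ofList art_pieces
  unique_values.foldl (fun result val =>
    if PySem.Set.contains unique_values (val + 1) then
      let subsequence_length :=
        art_pieces.foldl (fun n piece =>
          if piece == val || piece == val + 1 then n + 1 else n) (0 : Int)
      max result subsequence_length
    else result) 0

-- ===== PORT B =====
-- Source B's outer while loop over the sorted list: each step consumes one run of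
-- equal values (the inner 'while j < n and pieces[j] == v' is exactly
-- takeWhile/dropWhile on the remainder) and updates (prev, result).
def pvSweep (pieces : List Int) (prev : Option (Int × Int)) (result : Int) : Int :=
  match pieces with
  | [] => result
  | v :: tl =>
    let run := (v :: tl).takeWhile (fun y => y == v)
    let rest := (v :: tl).dropWhile (fun y => y == v)
    let c : Int := run.length
    let result' :=
      match prev with
      | some pv => if v == pv.1 + 1 then max result (pv.2 + c) else result
      | none => result
    pvSweep rest (some (v, c)) result'
termination_by pieces.length
decreasing_by
  simp only [List.dropWhile_cons, BEq.rfl, if_pos, List.length_cons]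
  exact Nat.lt_succ_of_le (List.length_dropWhile_le _ _)

def find_balanced_subsequence_alt (art_pieces : List Int) : Int :=
  pvSweep (PySem.List.sorted art_pieces (fun x => x) false) none 0

-- ===== PRECONDITION & SPEC =====
def Spec_find_balanced_subsequence (art_pieces : List Int) (out : Int) : Prop := out = find_balanced_subsequence_alt art_pieces
instance (art_pieces : List Int) (out : Int) : Decidable (Spec_find_balanced_subsequence art_pieces out) := by unfold Spec_find_balanced_subsequence; infer_instance

-- ===== CLAIM (what is proved, stated in full; the proofs are below) =====
def Claim_equal_find_balanced_subsequence : Prop := ∀ (art_pieces : List Int), Dom_find_balanced_subsequence art_pieces → Spec_find_balanced_subsequence art_pieces (find_balanced_subsequence art_pieces)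

-- ===== LEMMAS AND PROOFS =====

-- The common shape both programs reduce to: a running max over candidate values v
-- present in l with v+1 also present, each contributing count(v) + count(v+1).
def pvStep (l : List Int) (a : Int) (v : Int) : Int :=
  if (v + 1) ∈ l then max a ((l.count v : Int) + (l.count (v + 1) : Int)) else a

-- The accumulator pvSweep carries: prev = some (pv, pc) still owes the
-- contribution pc + count(pv+1) if pv+1 occurs in the remaining suffix.
def pvStart (l : List Int) (prev : Option (Int × Int)) (r : Int) : Int :=
  match prev with
  | some pv => if (pv.1 + 1) ∈ l then max r (pv.2 + (l.count (pv.1 + 1) : Int)) else r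
  | none => r

theorem pvStep_rcomm (l : List Int) (b : Int) (v w : Int) :
    pvStep l (pvStep l b v) w = pvStep l (pvStep l b w) v := by
  simp only [pvStep]; split_ifs <;> omega

theorem fold_pvStep_perm (l : List Int) {u1 u2 : List Int} (h1 : u1.Nodup) (h2 : u2.Nodup)
    (hm : ∀ a, a ∈ u1 ↔ a ∈ u2) (a : Int) :
    u1.foldl (pvStep l) a = u2.foldl (pvStep l) a :=
  @List.Perm.foldl_eq _ _ _ _ _ ⟨pvStep_rcomm l⟩ ((List.perm_ext_iff_of_nodup h1 h2).mpr hm) a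

-- Counting the elements equal to v or v+1 in one scan equals the sum of the two counts.
theorem countP_pair_eq_count_add (xs : List Int) (v : Int) :
    xs.countP (fun p => p == v || p == v + 1) = xs.count v + xs.count (v + 1) := by
  induction xs with
  | nil => simp
  | cons x t ih =>
    simp only [List.countP_cons, List.count_cons, ih]
    by_cases h : x = v <;> by_cases h2 : x = v + 1 <;> simp [h, h2] <;> omega

-- A is the pvStep fold over the insertion-order set of values.
theorem A_eq_fold (xs : List Int) :
    find_balanced_subsequence xs = (PySem.Set.ofList xs).foldl (pvStep xs) 0 := by
  unfold find_balanced_subsequence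
  apply PySem.List.foldl_congr_mem
  intro acc val _
  rw [PySem.List.foldl_if_add_one, countP_pair_eq_count_add, pvStep]
  simp only [PySem.Set.contains]
  by_cases h : (val + 1) ∈ xs <;> simp [h]

theorem sweep_eq (n : Nat) : ∀ (s : List Int), s.length ≤ n → s.Pairwise (· ≤ ·) →
    ∀ (prev : Option (Int × Int)) (r : Int), (∀ p, prev = some p → ∀ x ∈ s, p.1 < x) →
    pvSweep s prev r = (PySem.Set.ofList s).foldl (pvStep s) (pvStart s prev r) := by
  induction n with
  | zero =>
    intro s hn _ prev r _
    have hnil : s = [] := List.eq_nil_of_length_eq_zero (Nat.le_zero.mp hn)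
    subst hnil
    cases prev <;> simp [pvSweep, pvStart, PySem.Set.ofList_nil]
  | succ n ih =>
    intro s hn hs prev r hp
    match s with
    | [] => cases prev <;> simp [pvSweep, pvStart, PySem.Set.ofList_nil]
    | v0 :: t =>
      have hsplit : (v0 :: t).takeWhile (fun y : Int => y == v0) ++
          (v0 :: t).dropWhile (fun y : Int => y == v0) = v0 :: t :=
        List.takeWhile_append_dropWhile
      set run := (v0 :: t).takeWhile (fun y : Int => y == v0) with hrun_def
      set rest := (v0 :: t).dropWhile (fun y : Int => y == v0) with hrest_def
      have hrestsub : rest.Sublist (v0 :: t) := List.dropWhile_sublist _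
      have hrest_pw : rest.Pairwise (· ≤ ·) := hs.sublist hrestsub
      have hle : ∀ x ∈ t, v0 ≤ x := (List.pairwise_cons.mp hs).1
      have F2 : ∀ x ∈ rest, v0 < x := by
        cases hr : rest with
        | nil => simp
        | cons h0 t' =>
          have hdw : (v0 :: t).dropWhile (fun y : Int => y == v0) = h0 :: t' :=
            hrest_def.symm.trans hr
          have w : (v0 :: t).dropWhile (fun y : Int => y == v0) ≠ [] := by simp [hdw]
          have h2 := List.head_dropWhile_not (fun y : Int => y == v0) w
          have h3 : ((v0 :: t).dropWhile (fun y : Int => y == v0)).head w = h0 := by simp [hdw]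
          rw [h3] at h2
          have hh0' : h0 ≠ v0 := by simpa using h2
          have hh0mem : h0 ∈ v0 :: t := hrestsub.subset (by rw [hr]; simp)
          have hv0h0 : v0 < h0 := by
            rcases List.mem_cons.mp hh0mem with h | h
            · exact absurd h hh0'
            · exact lt_of_le_of_ne (hle _ h) (Ne.symm hh0')
          have hpw' : (h0 :: t').Pairwise (· ≤ ·) := hr ▸ hrest_pw
          intro x hx
          rcases List.mem_cons.mp hx with rfl | h
          · exact hv0h0
          · exact lt_of_lt_of_le hv0h0 ((List.pairwise_cons.mp hpw').1 _ h)
      have hnotmem : v0 ∉ rest := fun h => lt_irrefl v0 (F2 v0 h)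
      have Fmem : ∀ y, y ∈ (v0 :: t) ↔ y = v0 ∨ y ∈ rest := by
        intro y
        constructor
        · intro hy
          rw [← hsplit] at hy
          rcases List.mem_append.mp hy with h | h
          · left; simpa using List.mem_takeWhile_imp h
          · right; exact h
        · rintro (rfl | h)
          · exact List.mem_cons_self
          · exact hrestsub.subset h
      have Fcount : ∀ y, y ≠ v0 → (v0 :: t).count y = rest.count y := by
        intro y hy
        conv_lhs => rw [← hsplit]
        rw [List.count_append]
        have hz : run.count y = 0 := by
          rw [List.count_eq_zero]
          intro hmem
          exact hy (by simpa using List.mem_takeWhile_imp hmem)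
        omega
      have F1 : ((v0 :: t).count v0) = run.length := by
        conv_lhs => rw [← hsplit]
        rw [List.count_append]
        have h1 : rest.count v0 = 0 := List.count_eq_zero.mpr hnotmem
        have h2 : run.count v0 = run.length := by
          rw [List.count_eq_length]
          intro b hb
          exact (by simpa using List.mem_takeWhile_imp hb : b = v0).symm
        omega
      set c : Int := (run.length : Int) with hc_def
      -- one pvSweep step, with the new accumulator identified as pvStart of the tail
      have harg : ∀ pv : Int × Int, prev = some pv →
          (if v0 == pv.1 + 1 then max r (pv.2 + c) else r) = pvStart (v0 :: t) prev r := by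
        intro pv hspv
        subst hspv
        have hpv : ∀ x ∈ v0 :: t, pv.1 < x := hp pv rfl
        by_cases hcase : v0 = pv.1 + 1
        · have hmem : pv.1 + 1 ∈ v0 :: t := by rw [← hcase]; exact List.mem_cons_self
          have hcnt : (v0 :: t).count (pv.1 + 1) = run.length := by rw [← hcase]; exact F1
          have hbeq : (v0 == pv.1 + 1) = true := beq_iff_eq.mpr hcase
          simp only [hbeq, if_true, pvStart]
          rw [if_pos hmem, hcnt, hc_def]
        · have hnm : pv.1 + 1 ∉ v0 :: t := by
            intro hmem
            have h1 : pv.1 < v0 := hpv v0 List.mem_cons_self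
            have h2 : v0 ≤ pv.1 + 1 := by
              rcases List.mem_cons.mp hmem with h | h
              · omega
              · have := hle _ h; omega
            exact hcase (by omega)
          have hbeq : (v0 == pv.1 + 1) = false := beq_eq_false_iff_ne.mpr hcase
          simp only [hbeq, Bool.false_eq_true, if_false, pvStart]
          rw [if_neg hnm]
      have hstep1 : pvSweep (v0 :: t) prev r = pvSweep rest (some (v0, c)) (pvStart (v0 :: t) prev r) := by
        rw [pvSweep.eq_def]
        cases prev with
        | none => rfl
        | some pv => rw [← harg pv rfl]
      have hrest_len : rest.length ≤ n := by
        have hd : (v0 :: t).dropWhile (fun y : Int => y == v0) = t.dropWhile (fun y : Int => y == v0) := by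
          simp
        have h2 := List.length_dropWhile_le (fun y : Int => y == v0) t
        rw [hrest_def, hd]
        simp only [List.length_cons] at hn
        omega
      have hIH := ih rest hrest_len hrest_pw (some (v0, c)) (pvStart (v0 :: t) prev r)
        (by rintro p hp' x hx; injection hp' with h; rw [← h]; exact F2 x hx)
      -- one pvStep at v0 produces the start carried into rest
      have hKb : pvStep (v0 :: t) (pvStart (v0 :: t) prev r) v0
          = pvStart rest (some (v0, c)) (pvStart (v0 :: t) prev r) := by
        have hne : v0 + 1 ≠ v0 := by omega
        have hm : ((v0 + 1) ∈ (v0 :: t)) = ((v0 + 1) ∈ rest) := by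
          rw [eq_iff_iff, Fmem]; simp [hne]
        have hc2 : (v0 :: t).count (v0 + 1) = rest.count (v0 + 1) := Fcount _ hne
        simp only [pvStep, pvStart, hm, hc2, F1, hc_def]
      -- the two steps agree on members of rest
      have F5 : ∀ (a : Int), ∀ v ∈ PySem.Set.ofList rest,
          pvStep (v0 :: t) a v = pvStep rest a v := by
        intro a v hv
        have hvr : v ∈ rest := (PySem.Set.mem_ofList rest v).mp hv
        have hvgt : v0 < v := F2 v hvr
        have hm : ((v + 1) ∈ (v0 :: t)) = ((v + 1) ∈ rest) := by
          rw [eq_iff_iff, Fmem]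
          have : v + 1 ≠ v0 := by omega
          simp [this]
        have hc1 : (v0 :: t).count v = rest.count v := Fcount v (by omega)
        have hc2 : (v0 :: t).count (v + 1) = rest.count (v + 1) := Fcount _ (by omega)
        simp only [pvStep, hm, hc1, hc2]
      have hnodup2 : (v0 :: PySem.Set.ofList rest).Nodup :=
        List.nodup_cons.mpr ⟨fun h => hnotmem ((PySem.Set.mem_ofList rest v0).mp h),
          PySem.Set.nodup_ofList rest⟩
      have hperm : (PySem.Set.ofList (v0 :: t)).foldl (pvStep (v0 :: t)) (pvStart (v0 :: t) prev r)
          = (v0 :: PySem.Set.ofList rest).foldl (pvStep (v0 :: t)) (pvStart (v0 :: t) prev r) :=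
        fold_pvStep_perm _ (PySem.Set.nodup_ofList _) hnodup2
          (fun a => by
            rw [PySem.Set.mem_ofList, Fmem a, List.mem_cons, PySem.Set.mem_ofList])
          _
      calc pvSweep (v0 :: t) prev r
          = pvSweep rest (some (v0, c)) (pvStart (v0 :: t) prev r) := hstep1
        _ = (PySem.Set.ofList rest).foldl (pvStep rest)
              (pvStart rest (some (v0, c)) (pvStart (v0 :: t) prev r)) := hIH
        _ = (PySem.Set.ofList rest).foldl (pvStep (v0 :: t))
              (pvStart rest (some (v0, c)) (pvStart (v0 :: t) prev r)) :=
            (PySem.List.foldl_congr_mem _ _ _ _ F5).symm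
        _ = (PySem.Set.ofList rest).foldl (pvStep (v0 :: t))
              (pvStep (v0 :: t) (pvStart (v0 :: t) prev r) v0) := by rw [hKb]
        _ = (v0 :: PySem.Set.ofList rest).foldl (pvStep (v0 :: t)) (pvStart (v0 :: t) prev r) := by
            rw [List.foldl_cons]
        _ = (PySem.Set.ofList (v0 :: t)).foldl (pvStep (v0 :: t)) (pvStart (v0 :: t) prev r) :=
            hperm.symm

theorem B_eq_A (xs : List Int) :
    find_balanced_subsequence xs = find_balanced_subsequence_alt xs := by
  unfold find_balanced_subsequence_alt
  set s := PySem.List.sorted xs (fun x => x) false with hs_def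
  have hperm : s.Perm xs := PySem.List.sorted_perm xs _ _
  have hpw : s.Pairwise (· ≤ ·) := by
    have := PySem.List.sorted_pairwise xs (fun x : Int => x)
    simpa using this
  rw [sweep_eq s.length s le_rfl hpw none 0 (by intro p hp; cases hp)]
  have hstep : ∀ (a : Int), ∀ v ∈ PySem.Set.ofList s, pvStep s a v = pvStep xs a v := by
    intro a v _
    simp only [pvStep, hperm.mem_iff, hperm.count_eq]
  rw [PySem.List.foldl_congr_mem _ _ _ _ hstep]
  rw [A_eq_fold]
  exact fold_pvStep_perm xs (PySem.Set.nodup_ofList _) (PySem.Set.nodup_ofList _)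
    (fun a => by rw [PySem.Set.mem_ofList, PySem.Set.mem_ofList, hperm.mem_iff]) 0

-- ===== VERDICT (by name: the statement is the Claim_ definition above) =====
theorem find_balanced_subsequence_spec : Claim_equal_find_balanced_subsequence := by
  intro xs _
  unfold Spec_find_balanced_subsequence
  exact B_eq_A xs
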